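-- pv_equiv track=rewrite | github.com/dkmak02/aoc2023 | day03/main.py | find_number_and_replace
-- ===== SOURCE A (Python) =====
-- def find_number_and_replace(line):
--     indexes = []
--     numbver = ""
--     for i, char in enumerate(line):
--         if char.isdigit():
--             numbver += char
--         else:
--             if numbver != "":
--                 indexes.append((i, len(numbver)))
--                 numbver = ""
--     if numbver != "":
--         indexes.append((len(line), len(numbver)))
--     return indexes
-- ===== SOURCE B (Python) =====
-- import re
--
-- def find_number_and_replace(line):
--     return [(m.end(), m.end() - m.start()) for m in re.finditer(r'[0-9]+', line)]
-- ===== Notes on version B (the rewrite author's own statement) =====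
-- stated objective: idiomatic
-- what changed: Replaced the manual character loop with a mutable accumulator string by a single regex finditer scan over maximal digit runs, mapping each match to (end, length).
import Mathlib
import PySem

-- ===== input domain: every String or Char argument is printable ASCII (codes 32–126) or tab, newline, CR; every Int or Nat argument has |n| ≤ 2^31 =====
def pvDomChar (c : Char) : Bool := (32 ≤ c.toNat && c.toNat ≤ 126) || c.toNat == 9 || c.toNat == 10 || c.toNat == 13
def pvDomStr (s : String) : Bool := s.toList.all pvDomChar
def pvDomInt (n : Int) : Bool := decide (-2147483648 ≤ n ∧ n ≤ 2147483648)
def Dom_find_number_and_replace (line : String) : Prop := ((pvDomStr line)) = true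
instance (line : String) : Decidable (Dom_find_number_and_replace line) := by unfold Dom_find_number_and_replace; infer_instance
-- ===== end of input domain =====

-- ===== PORT A =====
-- B replaces A's stateful character loop by a regex scan over maximal digit runs; same return value, no side effects.
-- Literal port of A: the for-loop over enumerate(line) carrying (indexes, numbver); numbver kept as List Char (only its contents/length are used).
def pvLoopA : List (Int × Char) → List (Int × Int) → List Char → List (Int × Int) × List Char
  | [], idxs, num => (idxs, num)
  | (i, ch) :: rest, idxs, num =>
    if ch.isDigit then pvLoopA rest idxs (num ++ [ch])
    else if num ≠ [] then pvLoopA rest (idxs ++ [(i, (num.length : Int))]) []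
    else pvLoopA rest idxs num

def find_number_and_replace (line : String) : List (Int × Int) :=
  let cs := line.toList
  let st := pvLoopA (PySem.List.enumerate cs 0) [] []
  if st.2 ≠ [] then st.1 ++ [((cs.length : Int), (st.2.length : Int))] else st.1

-- ===== PORT B =====
-- Port of B: re.finditer(r'[0-9]+', line) yields the maximal digit runs left to right;
-- each match m becomes (m.end(), m.end() - m.start()).  The regex engine's scan is
-- transcribed as: skip a non-digit, or take a whole maximal run at once.
def pvDigitRuns (cs : List Char) (pos : Int) : List (Int × Int) :=
  match cs with
  | [] => []
  | c :: rest =>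
    if c.isDigit then
      let k := ((c :: rest).takeWhile Char.isDigit).length
      (pos + (k : Int), (k : Int)) :: pvDigitRuns ((c :: rest).dropWhile Char.isDigit) (pos + (k : Int))
    else pvDigitRuns rest (pos + 1)
termination_by cs.length
decreasing_by
  · simp_all [List.dropWhile]
    exact List.length_dropWhile_le _ _
  · simp

def find_number_and_replace_alt (line : String) : List (Int × Int) :=
  pvDigitRuns line.toList 0

-- ===== PRECONDITION & SPEC =====
def Spec_find_number_and_replace (line : String) (out : List (Int × Int)) : Prop := out = find_number_and_replace_alt line
instance (line : String) (out : List (Int × Int)) : Decidable (Spec_find_number_and_replace line out) := by unfold Spec_find_number_and_replace; infer_instance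

-- ===== CLAIM (what is proved, stated in full; the proofs are below) =====
def Claim_equal_find_number_and_replace : Prop := ∀ (line : String), Dom_find_number_and_replace line → Spec_find_number_and_replace line (find_number_and_replace line)

-- ===== LEMMAS AND PROOFS =====

-- Common characterisation: pvAux p cs i is what A will still output when p digits are
-- pending ("numbver" has length p) and the scan stands at position i with cs remaining.
def pvAux (p : Nat) (cs : List Char) (i : Int) : List (Int × Int) :=
  match cs with
  | [] => if p ≠ 0 then [(i, (p : Int))] else []
  | c :: rest =>
    if c.isDigit then pvAux (p + 1) rest (i + 1)
    else (if p ≠ 0 then [(i, (p : Int))] else []) ++ pvAux 0 rest (i + 1)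

theorem pvLoopA_spec (cs : List Char) : ∀ (i : Int) (acc : List (Int × Int)) (num : List Char),
    (if (pvLoopA (PySem.List.enumerate cs i) acc num).2 ≠ [] then
       (pvLoopA (PySem.List.enumerate cs i) acc num).1
         ++ [(i + (cs.length : Int), ((pvLoopA (PySem.List.enumerate cs i) acc num).2.length : Int))]
     else (pvLoopA (PySem.List.enumerate cs i) acc num).1)
    = acc ++ pvAux num.length cs i := by
  induction cs with
  | nil =>
    intro i acc num
    simp only [PySem.List.enumerate_nil, pvLoopA, pvAux, List.length_nil, Int.natCast_zero,
      add_zero]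
    cases num <;> simp
  | cons c rest ih =>
    intro i acc num
    rw [PySem.List.enumerate_cons]
    by_cases hd : c.isDigit
    · simp only [pvLoopA, hd, if_pos, pvAux, ne_eq]
      have := ih (i + 1) acc (num ++ [c])
      simp only [List.length_append, List.length_cons] at this ⊢
      rw [show i + ((rest.length : Nat) + 1 : Nat) = (i + 1) + (rest.length : Int) by push_cast; ring]
      simpa using this
    · have hstep : pvLoopA ((i, c) :: PySem.List.enumerate rest (i + 1)) acc num
          = pvLoopA (PySem.List.enumerate rest (i + 1))
              (if num = [] then acc else acc ++ [(i, (num.length : Int))]) [] := by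
        by_cases hn : num = [] <;> simp [pvLoopA, hd, hn]
      have hih := ih (i + 1) (if num = [] then acc else acc ++ [(i, (num.length : Int))]) []
      simp only [List.length_nil] at hih
      rw [hstep]
      simp only [List.length_cons, Nat.cast_add, Nat.cast_one]
      rw [show i + ((rest.length : Int) + 1) = i + 1 + (rest.length : Int) by ring, hih]
      by_cases hn : num = []
      · simp [pvAux, hd, hn]
      · have hnl : num.length ≠ 0 := by simpa using hn
        simp [pvAux, hd, hn, hnl]

theorem pvAux_runs : ∀ (n : Nat) (cs : List Char), cs.length ≤ n →
    (∀ (i : Int), pvAux 0 cs i = pvDigitRuns cs i) ∧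
    (∀ (i : Int) (p : Nat), p ≠ 0 →
      pvAux p cs i
        = (i + ((cs.takeWhile Char.isDigit).length : Int),
           (p : Int) + ((cs.takeWhile Char.isDigit).length : Int))
          :: pvDigitRuns (cs.dropWhile Char.isDigit)
               (i + ((cs.takeWhile Char.isDigit).length : Int))) := by
  intro n
  induction n with
  | zero =>
    intro cs h
    have : cs = [] := List.eq_nil_of_length_eq_zero (Nat.le_zero.mp h)
    subst this
    constructor
    · intro i; simp [pvAux, pvDigitRuns]
    · intro i p hp; simp [pvAux, pvDigitRuns, hp]
  | succ n ih =>
    intro cs h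
    cases cs with
    | nil =>
      constructor
      · intro i; simp [pvAux, pvDigitRuns]
      · intro i p hp; simp [pvAux, pvDigitRuns, hp]
    | cons c rest =>
      have hr : rest.length ≤ n := by simpa using h
      constructor
      · intro i
        by_cases hd : c.isDigit
        · rw [show pvAux 0 (c :: rest) i = pvAux 1 rest (i + 1) by simp [pvAux, hd]]
          rw [(ih rest hr).2 (i + 1) 1 one_ne_zero]
          rw [show pvDigitRuns (c :: rest) i
              = (i + (((c :: rest).takeWhile Char.isDigit).length : Int),
                 (((c :: rest).takeWhile Char.isDigit).length : Int))
                :: pvDigitRuns ((c :: rest).dropWhile Char.isDigit)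
                     (i + (((c :: rest).takeWhile Char.isDigit).length : Int)) by
            simp [pvDigitRuns, hd]]
          simp only [List.takeWhile_cons, hd, if_pos, List.dropWhile_cons, List.length_cons]
          rw [show i + (((List.takeWhile Char.isDigit rest).length + 1 : Nat) : Int)
              = i + 1 + ((List.takeWhile Char.isDigit rest).length : Int) by push_cast; ring]
          simp only [List.cons.injEq, Prod.mk.injEq, true_and, and_true]
          push_cast; ring
        · rw [show pvAux 0 (c :: rest) i = pvAux 0 rest (i + 1) by simp [pvAux, hd]]
          rw [(ih rest hr).1 (i + 1)]
          simp [pvDigitRuns, hd]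
      · intro i p hp
        by_cases hd : c.isDigit
        · rw [show pvAux p (c :: rest) i = pvAux (p + 1) rest (i + 1) by simp [pvAux, hd]]
          rw [(ih rest hr).2 (i + 1) (p + 1) (Nat.succ_ne_zero p)]
          simp only [List.takeWhile_cons, hd, if_pos, List.dropWhile_cons, List.length_cons]
          rw [show i + (((List.takeWhile Char.isDigit rest).length + 1 : Nat) : Int)
              = i + 1 + ((List.takeWhile Char.isDigit rest).length : Int) by push_cast; ring]
          simp only [List.cons.injEq, Prod.mk.injEq, true_and, and_true]
          push_cast; ring
        · rw [show pvAux p (c :: rest) i = [(i, (p : Int))] ++ pvAux 0 rest (i + 1) by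
            simp [pvAux, hd, hp]]
          rw [(ih rest hr).1 (i + 1)]
          simp [pvDigitRuns, hd]

-- ===== VERDICT (by name: the statement is the Claim_ definition above) =====
theorem find_number_and_replace_spec : Claim_equal_find_number_and_replace := by
  intro line _
  unfold Spec_find_number_and_replace find_number_and_replace find_number_and_replace_alt
  have h := pvLoopA_spec line.toList 0 [] []
  simp only [List.length_nil, List.nil_append, zero_add] at h
  simp only []
  rw [h, (pvAux_runs line.toList.length line.toList le_rfl).1 0]
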